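-- pv_equiv track=rewrite | github.com/Chillstad/ROOBEER | roobeer.py | toRoobeer
-- ===== SOURCE A (Python) =====
-- def toRoobeer(inputInt):
-- 	output = ""
-- 	inputInt = str(format(inputInt, "b"))
--
-- 	for i in inputInt:
-- 		if i == "-":
-- 			output += "NO"
-- 		elif i == "0":
-- 			output += "BEER"
-- 		elif i == "1":
-- 			output += "ROO"
-- 		output += " "
--
-- 	return output
-- ===== SOURCE B (Python) =====
-- def toRoobeer(inputInt):
--     if inputInt == 0:
--         return "BEER "
--     n = abs(inputInt)
--     toks = []
--     while n:
--         n, bit = divmod(n, 2)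
--         toks.append("ROO " if bit else "BEER ")
--     toks.reverse()
--     return ("NO " if inputInt < 0 else "") + "".join(toks)
-- ===== Notes on version B (the rewrite author's own statement) =====
-- stated objective: alternative
-- what changed: B builds the bit sequence arithmetically with a divmod loop and emits whole tokens ('ROO '/'BEER ') directly, joining them once, instead of formatting to a binary string and mapping character by character.
import Mathlib
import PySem

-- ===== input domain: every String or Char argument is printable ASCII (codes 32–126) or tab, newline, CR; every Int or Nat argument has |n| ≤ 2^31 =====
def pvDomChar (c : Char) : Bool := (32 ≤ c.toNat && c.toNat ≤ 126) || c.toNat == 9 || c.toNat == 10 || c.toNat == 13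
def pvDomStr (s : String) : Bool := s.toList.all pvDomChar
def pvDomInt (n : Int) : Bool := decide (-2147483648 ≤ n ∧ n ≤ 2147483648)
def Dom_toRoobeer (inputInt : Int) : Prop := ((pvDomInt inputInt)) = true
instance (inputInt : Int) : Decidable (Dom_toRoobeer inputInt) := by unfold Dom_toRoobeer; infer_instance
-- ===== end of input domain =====

-- B builds the bits arithmetically (divmod loop) and joins whole tokens, instead of
-- formatting to a binary string and mapping characters; alternative decomposition, same cost.


-- ===== PORT A =====
-- format(n,'b'): minus sign (if negative) followed by the binary digits of |n|, "0" for 0.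
def binBits (n : Nat) : List Char :=
  if _h : n = 0 then [] else binBits (n / 2) ++ [if n % 2 = 1 then '1' else '0']
decreasing_by omega

def formatB (inputInt : Int) : List Char :=
  if inputInt < 0 then '-' :: binBits inputInt.natAbs
  else if inputInt = 0 then ['0']
  else binBits inputInt.natAbs

def toRoobeer (inputInt : Int) : String :=
  (formatB inputInt).foldl
    (fun output i =>
      (if i = '-' then output ++ "NO"
       else if i = '0' then output ++ "BEER"
       else if i = '1' then output ++ "ROO"
       else output) ++ " ")
    ""

-- ===== PORT B =====
-- the tokens collected by Source B's while loop, least-significant bit first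
def collectToks (n : Nat) : List String :=
  if _h : n = 0 then [] else (if n % 2 = 1 then "ROO " else "BEER ") :: collectToks (n / 2)
decreasing_by omega

def toRoobeer_alt (inputInt : Int) : String :=
  if inputInt = 0 then "BEER "
  else (if inputInt < 0 then "NO " else "") ++ String.join (collectToks inputInt.natAbs).reverse

-- ===== PRECONDITION & SPEC =====
def Spec_toRoobeer (inputInt : Int) (out : String) : Prop := out = toRoobeer_alt inputInt
instance (inputInt : Int) (out : String) : Decidable (Spec_toRoobeer inputInt out) := by unfold Spec_toRoobeer; infer_instance

-- ===== CLAIM (what is proved, stated in full; the proofs are below) =====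
def Claim_equal_toRoobeer : Prop := ∀ (inputInt : Int), Dom_toRoobeer inputInt → Spec_toRoobeer inputInt (toRoobeer inputInt)

-- ===== LEMMAS AND PROOFS =====

theorem join_concat (xs : List String) (y : String) :
    String.join (xs ++ [y]) = String.join xs ++ y := by
  simp [String.join, List.foldl_append]

theorem foldl_binBits (n : Nat) : ∀ s : String,
    (binBits n).foldl
      (fun output i =>
        (if i = '-' then output ++ "NO"
         else if i = '0' then output ++ "BEER"
         else if i = '1' then output ++ "ROO"
         else output) ++ " ")
      s = s ++ String.join (collectToks n).reverse := by
  induction n using Nat.strong_induction_on with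
  | _ n ih =>
    intro s
    by_cases h : n = 0
    · subst h
      simp [binBits, collectToks, String.join]
    · rw [binBits, collectToks]
      simp only [h, dif_neg, not_false_iff]
      rw [List.foldl_append, ih (n / 2) (by omega) s]
      simp only [List.foldl]
      rw [List.reverse_cons, join_concat]
      by_cases hb : n % 2 = 1 <;>
        simp [hb, String.append_assoc]

-- ===== VERDICT (by name: the statement is the Claim_ definition above) =====
theorem toRoobeer_spec : Claim_equal_toRoobeer := by
  intro inputInt _
  unfold Spec_toRoobeer toRoobeer toRoobeer_alt formatB
  by_cases hz : inputInt = 0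
  · subst hz; decide
  · by_cases hn : inputInt < 0
    · rw [if_pos hn]
      simp only [List.foldl]
      rw [foldl_binBits, if_neg hz, if_pos hn]
      congr 1
    · rw [if_neg hn, if_neg hz]
      rw [foldl_binBits, if_neg hz, if_neg hn]
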